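-- pv_equiv track=rewrite | github.com/arushi-08/coding | my-folder/1129-longest-string-chain/solution.py | compare_optim
-- ===== SOURCE A (Python) =====
-- def compare_optim(word1, word2):
--
--     bigger_word = ""
--     smaller_word = ""
--     if len(word1) > len(word2):
--         bigger_word = word1
--         smaller_word = word2
--     else:
--         bigger_word = word2
--         smaller_word = word1
--
--     for w in range(len(bigger_word)):
--         if bigger_word[:w] + bigger_word[w+1:] == smaller_word:
--             return True
--     return False
-- ===== SOURCE B (Python) =====
-- def compare_optim(word1, word2):
--     if len(word1) > len(word2):
--         big, small = word1, word2
--     else: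
--         big, small = word2, word1
--     if len(big) != len(small) + 1:
--         return False
--     i = 0
--     while i < len(small) and big[i] == small[i]:
--         i += 1
--     return big[i+1:] == small[i:]
-- ===== Notes on version B (the rewrite author's own statement) =====
-- stated objective: faster
-- what changed: Replaces the try-every-deletion loop (L slice-builds and comparisons) with a length check plus a single two-pointer scan that skips one character of the longer word at the first mismatch.
import Mathlib
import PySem

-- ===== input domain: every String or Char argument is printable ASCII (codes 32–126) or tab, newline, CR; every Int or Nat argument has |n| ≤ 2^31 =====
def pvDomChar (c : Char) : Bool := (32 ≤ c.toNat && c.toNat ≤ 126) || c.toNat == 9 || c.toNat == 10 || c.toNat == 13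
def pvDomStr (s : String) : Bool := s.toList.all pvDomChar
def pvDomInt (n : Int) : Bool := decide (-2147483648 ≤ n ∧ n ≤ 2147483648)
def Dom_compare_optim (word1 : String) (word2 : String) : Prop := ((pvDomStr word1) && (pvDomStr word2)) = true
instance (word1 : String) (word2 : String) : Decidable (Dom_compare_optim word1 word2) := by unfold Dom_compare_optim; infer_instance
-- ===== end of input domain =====

-- B replaces A's try-every-deletion slice loop by a length check plus one two-pointer scan (faster: asymptotic, O(L) vs O(L^2)).

-- ===== PORT A =====
-- the 'for w in range(len(bigger_word)): if bigger_word[:w] + bigger_word[w+1:] == smaller_word: return True' loop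
def pvLoopA (big small : List Char) : List Int → Bool
  | [] => false
  | w :: ws =>
    if (PySem.List.slice big none (some w) ++ PySem.List.slice big (some (w + 1)) none) == small
    then true
    else pvLoopA big small ws

def compare_optim (word1 : String) (word2 : String) : Bool :=
  let bigger_word := if PySem.Str.len word1 > PySem.Str.len word2 then word1 else word2
  let smaller_word := if PySem.Str.len word1 > PySem.Str.len word2 then word2 else word1
  pvLoopA bigger_word.toList smaller_word.toList (PySem.List.pyRange 0 (PySem.Str.len bigger_word) 1)

-- ===== PORT B =====
-- the 'while i < len(small) and big[i] == small[i]: i += 1; return big[i+1:] == small[i:]' scan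
def pvTwoPointer : List Char → List Char → Bool
  | b :: bs, s :: ss => if b == s then pvTwoPointer bs ss else bs == s :: ss
  | _ :: bs, [] => bs == ([] : List Char)
  | [], _ => false

def compare_optim_alt (word1 : String) (word2 : String) : Bool :=
  let big := if PySem.Str.len word1 > PySem.Str.len word2 then word1.toList else word2.toList
  let small := if PySem.Str.len word1 > PySem.Str.len word2 then word2.toList else word1.toList
  if big.length ≠ small.length + 1 then false else pvTwoPointer big small

-- ===== PRECONDITION & SPEC =====
def Spec_compare_optim (word1 : String) (word2 : String) (out : Bool) : Prop := out = compare_optim_alt word1 word2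
instance (word1 : String) (word2 : String) (out : Bool) : Decidable (Spec_compare_optim word1 word2 out) := by unfold Spec_compare_optim; infer_instance

-- ===== CLAIM (what is proved, stated in full; the proofs are below) =====
def Claim_equal_compare_optim : Prop := ∀ (word1 : String) (word2 : String), Dom_compare_optim word1 word2 → Spec_compare_optim word1 word2 (compare_optim word1 word2)

-- ===== LEMMAS AND PROOFS =====

-- A's loop is an 'any' over its range list
theorem pvLoopA_eq_any (big small : List Char) (ws : List Int) :
    pvLoopA big small ws = ws.any
      (fun w => (PySem.List.slice big none (some w) ++ PySem.List.slice big (some (w + 1)) none) == small) := by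
  induction ws with
  | nil => rfl
  | cons w ws ih => simp only [pvLoopA, List.any_cons]; split_ifs with h <;> simp [h, ih]

-- characterisation of A's loop: some single deletion of big gives small
theorem pvLoopA_char (big small : List Char) :
    pvLoopA big small (PySem.List.pyRange 0 (big.length : Int) 1) = true ↔
      ∃ k < big.length, big.eraseIdx k = small := by
  rw [pvLoopA_eq_any, List.any_eq_true]
  constructor
  · rintro ⟨w, hw, hcond⟩
    rw [PySem.List.mem_pyRange_one] at hw
    obtain ⟨hw0, hwlt⟩ := hw
    refine ⟨w.toNat, by omega, ?_⟩
    rw [PySem.List.slice_to big hw0, PySem.List.slice_from big (show (0:Int) ≤ w + 1 by omega)] at hcond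
    have : (w + 1).toNat = w.toNat + 1 := by omega
    rw [this] at hcond
    rw [List.eraseIdx_eq_take_drop_succ]
    exact beq_iff_eq.mp hcond
  · rintro ⟨k, hk, hek⟩
    refine ⟨(k : Int), ?_, ?_⟩
    · rw [PySem.List.mem_pyRange_one]; omega
    · rw [PySem.List.slice_to big (show (0:Int) ≤ (k:Int) by omega), PySem.List.slice_from big (show (0:Int) ≤ (k:Int) + 1 by omega)]
      have h1 : ((k : Int)).toNat = k := by omega
      have h2 : ((k : Int) + 1).toNat = k + 1 := by omega
      rw [h1, h2, beq_iff_eq, ← List.eraseIdx_eq_take_drop_succ]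
      exact hek

-- characterisation of B's scan: some single deletion of big gives small
theorem pvTwoPointer_char (big small : List Char) :
    pvTwoPointer big small = true ↔ ∃ k < big.length, big.eraseIdx k = small := by
  induction big generalizing small with
  | nil => simp [pvTwoPointer]
  | cons b bs ih =>
    cases small with
    | nil =>
      simp only [pvTwoPointer, beq_iff_eq]
      constructor
      · intro h; exact ⟨0, by simp, by simp [h]⟩
      · rintro ⟨k, hk, hek⟩
        cases k with
        | zero => simpa using hek
        | succ k => simp [List.eraseIdx] at hek
    | cons s ss =>
      simp only [pvTwoPointer]
      split_ifs with hb
      · rw [beq_iff_eq] at hb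
        subst hb
        rw [ih]
        constructor
        · rintro ⟨k, hk, hek⟩
          exact ⟨k + 1, by simpa using hk, by simp [List.eraseIdx, hek]⟩
        · rintro ⟨k, hk, hek⟩
          cases k with
          | zero =>
            simp only [List.eraseIdx] at hek
            subst hek
            exact ⟨0, by simp, by simp [List.eraseIdx]⟩
          | succ k =>
            simp only [List.eraseIdx, List.cons.injEq] at hek
            exact ⟨k, by simpa using hk, hek.2⟩
      · rw [beq_iff_eq]
        constructor
        · intro h; exact ⟨0, by simp, by simp [List.eraseIdx, h]⟩
        · rintro ⟨k, hk, hek⟩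
          cases k with
          | zero => simpa [List.eraseIdx] using hek
          | succ k =>
            simp only [List.eraseIdx, List.cons.injEq] at hek
            exact absurd (beq_iff_eq.mpr hek.1) hb

-- the list-level equivalence
theorem pv_main (b s : List Char) :
    pvLoopA b s (PySem.List.pyRange 0 (b.length : Int) 1) =
      if b.length ≠ s.length + 1 then false else pvTwoPointer b s := by
  split_ifs with h
  · by_contra hne
    have htrue : pvLoopA b s (PySem.List.pyRange 0 (b.length : Int) 1) = true := by
      cases hval : pvLoopA b s (PySem.List.pyRange 0 (b.length : Int) 1) <;> simp_all
    obtain ⟨k, hk, hek⟩ := (pvLoopA_char b s).mp htrue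
    have := List.length_eraseIdx (l := b) (i := k)
    rw [hek] at this
    simp [hk] at this
    omega
  · rw [Bool.eq_iff_iff, pvLoopA_char, pvTwoPointer_char]

-- ===== VERDICT (by name: the statement is the Claim_ definition above) =====
theorem compare_optim_spec : Claim_equal_compare_optim := by
  intro word1 word2 _
  unfold Spec_compare_optim compare_optim compare_optim_alt
  simp only [PySem.Str.len_eq]
  split_ifs with h1 h2 h3 <;> rw [pv_main] <;> simp_all
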